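-- pv_equiv track=rewrite | github.com/paolosabatini/fanta-voto-ai | dataprep/web_helpers.py | get_div
-- ===== SOURCE A (Python) =====
-- def get_div ( web_content, div_id = '', div_type = '', extra_label = '' ):
--     div_content = str()
--     found = False
--     if div_type == '' : return web_content
--     for l in web_content.split('\n'):
--         if not found:
--             if div_id!='':
--                 if '<%s'%div_type not in l and '"%s"'%div_id not in l: continue
--                 else: found = True
--             else:
--                 if '<%s'%div_type not in l: continue
--                 else: found = True
--
--             if extra_label != '' and not extra_label in l and found: found = False
--         if found:
--             div_content += '%s\n' % l
--             if '</%s>'%div_type in l: break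
--     return div_content
-- ===== SOURCE B (Python) =====
-- def get_div(web_content, div_id='', div_type='', extra_label=''):
--     # Index-based staged computation: materialize all candidate start indices and
--     # all closing-tag offsets with comprehensions, then slice and join — no
--     # stateful scanning loop with a found flag and no early-exit copy loop.
--     if div_type == '':
--         return web_content
--     open_tag = '<' + div_type
--     close_tag = '</' + div_type + '>'
--     id_tag = '"' + div_id + '"'
--     lines = web_content.split('\n')
--     starts = [i for i, l in enumerate(lines)
--               if (open_tag in l or (div_id != '' and id_tag in l))
--               and (extra_label == '' or extra_label in l)]
--     if not starts:
--         return ''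
--     tail = lines[starts[0]:]
--     closes = [k for k, l in enumerate(tail) if close_tag in l]
--     e = closes[0] if closes else len(tail) - 1
--     return '\n'.join(tail[:e + 1]) + '\n'
-- ===== Notes on version B (the rewrite author's own statement) =====
-- stated objective: alternative
-- what changed: Replaces A's single stateful found-flag scan-and-append loop by staged index computation: two comprehensions materialize all candidate start indices and all closing-tag offsets, then the block is obtained by list slicing and a join instead of incremental string concatenation.
import Mathlib
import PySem

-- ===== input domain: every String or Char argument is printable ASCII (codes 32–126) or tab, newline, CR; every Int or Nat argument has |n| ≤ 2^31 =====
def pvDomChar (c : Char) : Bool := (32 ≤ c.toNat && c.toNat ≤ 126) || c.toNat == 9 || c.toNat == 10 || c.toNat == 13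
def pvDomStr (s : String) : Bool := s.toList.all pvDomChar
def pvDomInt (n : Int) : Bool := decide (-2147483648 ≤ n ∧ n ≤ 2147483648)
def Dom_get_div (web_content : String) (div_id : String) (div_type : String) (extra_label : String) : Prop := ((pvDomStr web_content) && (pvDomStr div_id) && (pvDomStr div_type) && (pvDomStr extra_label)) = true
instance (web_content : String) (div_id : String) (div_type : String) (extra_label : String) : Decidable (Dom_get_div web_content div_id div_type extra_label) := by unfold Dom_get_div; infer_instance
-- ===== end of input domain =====

-- B replaces A's stateful found-flag scan by staged index computation (comprehensions over enumerate, slicing, join); same result, alternative decomposition.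

-- ===== PORT A =====
-- literal transliteration of A's loop: `none` = Python's `continue`, the Bool is the `found` flag
def getDivLoopA (ty di ex : List Char) : List (List Char) → Bool → List Char → List Char
  | [], _, acc => acc
  | l :: rest, found, acc =>
    let f1 : Option Bool :=
      if found then some true
      else if di ≠ [] then
        if ¬ PySem.Chars.isIn ('<' :: ty) l ∧ ¬ PySem.Chars.isIn ('"' :: (di ++ ['"'])) l then none
        else some true
      else
        if ¬ PySem.Chars.isIn ('<' :: ty) l then none
        else some true
    match f1 with
    | none => getDivLoopA ty di ex rest found acc
    | some f2 =>
      let f3 := if found = false ∧ ex ≠ [] ∧ ¬ PySem.Chars.isIn ex l ∧ f2 = true then false else f2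
      if f3 then
        let acc' := acc ++ l ++ ['\n']
        if PySem.Chars.isIn ('<' :: '/' :: (ty ++ ['>'])) l then acc'
        else getDivLoopA ty di ex rest f3 acc'
      else getDivLoopA ty di ex rest f3 acc

def get_div (web_content : String) (div_id : String) (div_type : String) (extra_label : String) : String :=
  if div_type = "" then web_content
  else String.ofList (getDivLoopA div_type.toList div_id.toList extra_label.toList
        (PySem.Chars.splitOn web_content.toList ['\n']) false [])

-- ===== PORT B =====
-- Source B's start-line predicate (the comprehension's condition)
def getDivStartB (ty di ex : List Char) (l : List Char) : Bool :=
  (PySem.Chars.isIn ('<' :: ty) l || (decide (di ≠ []) && PySem.Chars.isIn ('"' :: (di ++ ['"'])) l))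
    && (decide (ex = []) || PySem.Chars.isIn ex l)

def get_div_alt (web_content : String) (div_id : String) (div_type : String) (extra_label : String) : String :=
  if div_type = "" then web_content
  else
    let tyl := div_type.toList
    let lines := PySem.Chars.splitOn web_content.toList ['\n']
    -- starts = [i for i, l in enumerate(lines) if <start predicate>]
    let starts := ((PySem.List.enumerate lines 0).filter
        (fun q => getDivStartB tyl div_id.toList extra_label.toList q.2)).map Prod.fst
    match starts with
    | [] => ""
    | s :: _ =>
      let tail := PySem.List.slice lines (some s) none
      -- closes = [k for k, l in enumerate(tail) if close_tag in l]
      let closes := ((PySem.List.enumerate tail 0).filter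
          (fun q => PySem.Chars.isIn ('<' :: '/' :: (tyl ++ ['>'])) q.2)).map Prod.fst
      let e : Int := match closes with | [] => (tail.length : Int) - 1 | c :: _ => c
      String.ofList (PySem.Chars.join ['\n'] (PySem.List.slice tail none (some (e + 1))) ++ ['\n'])

-- ===== PRECONDITION & SPEC =====
def Spec_get_div (web_content : String) (div_id : String) (div_type : String) (extra_label : String) (out : String) : Prop := out = get_div_alt web_content div_id div_type extra_label
instance (web_content : String) (div_id : String) (div_type : String) (extra_label : String) (out : String) : Decidable (Spec_get_div web_content div_id div_type extra_label out) := by unfold Spec_get_div; infer_instance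

-- ===== CLAIM (what is proved, stated in full; the proofs are below) =====
def Claim_equal_get_div : Prop := ∀ (web_content : String) (div_id : String) (div_type : String) (extra_label : String), Dom_get_div web_content div_id div_type extra_label → Spec_get_div web_content div_id div_type extra_label (get_div web_content div_id div_type extra_label)

-- ===== LEMMAS AND PROOFS =====

theorem pvJoinNilCons (p : List Char) (ps : List (List Char)) :
    PySem.Chars.join [] (p :: ps) = p ++ PySem.Chars.join [] ps := by
  cases ps <;> simp [PySem.Chars.join_cons_cons, PySem.Chars.join_singleton, PySem.Chars.join_nil]

-- mediating description of A's copy phase: take lines up to and including the first closing-tag line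
def pvCollect (ty : List Char) : List (List Char) → List (List Char)
  | [] => []
  | l :: rest =>
    if PySem.Chars.isIn ('<' :: '/' :: (ty ++ ['>'])) l then [l]
    else l :: pvCollect ty rest

-- the found=true phase of A equals copy-until-close, joined
theorem getDivLoopA_true (ty di ex : List Char) (xs : List (List Char)) (acc : List Char) :
    getDivLoopA ty di ex xs true acc
      = acc ++ PySem.Chars.join [] ((pvCollect ty xs).map (fun l => l ++ ['\n'])) := by
  induction xs generalizing acc with
  | nil => simp [getDivLoopA, pvCollect, PySem.Chars.join_nil]
  | cons l rest ih =>
    by_cases hcl : PySem.Chars.isIn ('<' :: '/' :: (ty ++ ['>'])) l <;>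
      simp [getDivLoopA, pvCollect, hcl, ih, pvJoinNilCons, PySem.Chars.join_singleton]

-- one not-found step of A, expressed through B's start predicate
theorem getDivLoopA_false_step (ty di ex l : List Char) (rest : List (List Char)) (acc : List Char) :
    getDivLoopA ty di ex (l :: rest) false acc =
      if getDivStartB ty di ex l then
        (if PySem.Chars.isIn ('<' :: '/' :: (ty ++ ['>'])) l then acc ++ l ++ ['\n']
         else getDivLoopA ty di ex rest true (acc ++ l ++ ['\n']))
      else getDivLoopA ty di ex rest false acc := by
  by_cases hdi : di = [] <;> by_cases ho : PySem.Chars.isIn ('<' :: ty) l <;>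
    by_cases hid : PySem.Chars.isIn ('"' :: (di ++ ['"'])) l <;>
    by_cases hex : ex = [] <;> by_cases hxl : PySem.Chars.isIn ex l <;>
    simp [getDivLoopA, getDivStartB, hdi, ho, hid, hex, hxl]

-- the whole of A's loop: drop non-start lines, then copy until the closing tag
theorem getDivLoopA_false (ty di ex : List Char) (xs : List (List Char)) (acc : List Char) :
    getDivLoopA ty di ex xs false acc
      = acc ++ PySem.Chars.join []
          ((pvCollect ty (xs.dropWhile (fun l => ! getDivStartB ty di ex l))).map (fun l => l ++ ['\n'])) := by
  induction xs generalizing acc with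
  | nil => simp [getDivLoopA, pvCollect, PySem.Chars.join_nil]
  | cons l rest ih =>
    rw [getDivLoopA_false_step, List.dropWhile_cons]
    by_cases hs : getDivStartB ty di ex l
    · by_cases hcl : PySem.Chars.isIn ('<' :: '/' :: (ty ++ ['>'])) l <;>
        simp [hs, hcl, pvCollect, getDivLoopA_true, pvJoinNilCons,
              PySem.Chars.join_singleton]
    · simp [hs, ih]

-- head of an index comprehension = length of the takeWhile prefix (none iff no line matches)
theorem pvFirstIdx (p : List Char → Bool) : ∀ (xs : List (List Char)) (n : Nat),
    (((PySem.List.enumerate xs (n : Int)).filter (fun q => p q.2)).map Prod.fst).head?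
      = if (xs.dropWhile (fun l => ! p l)) = [] then none
        else some (((n + (xs.takeWhile (fun l => ! p l)).length : Nat) : Int)) := by
  intro xs
  induction xs with
  | nil => intro n; simp [PySem.List.enumerate_nil]
  | cons l rest ih =>
    intro n
    have hcast : (n : Int) + 1 = ((n + 1 : Nat) : Int) := by push_cast; ring
    by_cases hl : p l
    · simp [PySem.List.enumerate_cons, hl]
    · rw [PySem.List.enumerate_cons, List.filter_cons]
      simp only [hl, List.dropWhile_cons, List.takeWhile_cons, Bool.not_false, if_true,
        Bool.false_eq_true, if_false, hcast, ih (n + 1)]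
      split_ifs with h
      · rfl
      · congr 1
        simp only [List.length_cons]
        push_cast
        omega

-- drop of the takeWhile length is dropWhile
theorem pvDropTakeWhile (p : List Char → Bool) (xs : List (List Char)) :
    xs.drop (xs.takeWhile p).length = xs.dropWhile p := by
  induction xs with
  | nil => simp
  | cons x xs ih => by_cases h : p x <;> simp [h, ih]

-- copy-until-close as a take: works whether or not a closing line exists
theorem pvCollect_eq_take (ty : List Char) (xs : List (List Char)) :
    pvCollect ty xs
      = xs.take ((xs.takeWhile (fun l => ! PySem.Chars.isIn ('<' :: '/' :: (ty ++ ['>'])) l)).length + 1) := by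
  induction xs with
  | nil => simp [pvCollect]
  | cons l rest ih =>
    by_cases hcl : PySem.Chars.isIn ('<' :: '/' :: (ty ++ ['>'])) l <;>
      simp [pvCollect, hcl, ih]

theorem pvCollect_ne_nil (ty x : List Char) (xs : List (List Char)) :
    pvCollect ty (x :: xs) ≠ [] := by
  by_cases hcl : PySem.Chars.isIn ('<' :: '/' :: (ty ++ ['>'])) x <;> simp [pvCollect, hcl]

theorem pvJoinNewline (x : List Char) (xs : List (List Char)) :
    PySem.Chars.join ['\n'] (x :: xs) ++ ['\n'] = PySem.Chars.join [] ((x :: xs).map (fun l => l ++ ['\n'])) := by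
  induction xs generalizing x with
  | nil => simp [PySem.Chars.join_singleton]
  | cons y ys ih =>
    rw [PySem.Chars.join_cons_cons, List.map_cons, pvJoinNilCons, ← ih y]
    simp

-- the B side, for an arbitrary line list, equals A's dropWhile-then-collect description
theorem pvMain (tyl dil exl : List Char) (lines : List (List Char)) :
    String.ofList (PySem.Chars.join []
        ((pvCollect tyl (lines.dropWhile (fun l => ! getDivStartB tyl dil exl l))).map (fun l => l ++ ['\n'])))
      = (match ((PySem.List.enumerate lines 0).filter (fun q => getDivStartB tyl dil exl q.2)).map Prod.fst with
        | [] => ""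
        | s :: _ =>
          let tail := PySem.List.slice lines (some s) none
          let closes := ((PySem.List.enumerate tail 0).filter
              (fun q => PySem.Chars.isIn ('<' :: '/' :: (tyl ++ ['>'])) q.2)).map Prod.fst
          let e : Int := match closes with | [] => (tail.length : Int) - 1 | c :: _ => c
          String.ofList (PySem.Chars.join ['\n'] (PySem.List.slice tail none (some (e + 1))) ++ ['\n'])) := by
  have hstarts := pvFirstIdx (fun l => getDivStartB tyl dil exl l) lines 0
  simp only [Nat.cast_zero, Nat.zero_add] at hstarts
  rcases hse : ((PySem.List.enumerate lines 0).filter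
      (fun q => getDivStartB tyl dil exl q.2)).map Prod.fst with _ | ⟨s, srest⟩
  · rw [hse] at hstarts
    have hdw : lines.dropWhile (fun l => ! getDivStartB tyl dil exl l) = [] := by
      by_contra hne
      rw [if_neg hne] at hstarts
      simp at hstarts
    rw [hdw]
    simp only [hse]
    simp [pvCollect, PySem.Chars.join_nil, String.ofList_nil]
  · rw [hse] at hstarts
    have hdw : ¬ lines.dropWhile (fun l => ! getDivStartB tyl dil exl l) = [] := by
      by_contra hne
      rw [if_pos hne] at hstarts
      simp at hstarts
    rw [if_neg hdw, List.head?_cons, Option.some.injEq] at hstarts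
    simp only [hse]
    subst hstarts
    rw [PySem.List.slice_from_natCast, pvDropTakeWhile]
    generalize hT : lines.dropWhile (fun l => ! getDivStartB tyl dil exl l) = tail at hdw
    -- second stage: the closing-tag index
    have hcl := pvFirstIdx (fun l => PySem.Chars.isIn ('<' :: '/' :: (tyl ++ ['>'])) l) tail 0
    simp only [Nat.cast_zero, Nat.zero_add] at hcl
    have hblock :
        PySem.List.slice tail none
          (some ((match ((PySem.List.enumerate tail 0).filter
                (fun q => PySem.Chars.isIn ('<' :: '/' :: (tyl ++ ['>'])) q.2)).map Prod.fst with
              | [] => (tail.length : Int) - 1 | c :: _ => c) + 1))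
          = pvCollect tyl tail := by
      rcases hce : ((PySem.List.enumerate tail 0).filter
          (fun q => PySem.Chars.isIn ('<' :: '/' :: (tyl ++ ['>'])) q.2)).map Prod.fst with _ | ⟨c, crest⟩
      · rw [hce] at hcl
        simp only [hce]
        have hnone : tail.dropWhile (fun l => ! PySem.Chars.isIn ('<' :: '/' :: (tyl ++ ['>'])) l) = [] := by
          by_contra hne
          rw [if_neg hne] at hcl
          simp at hcl
        have htw : (tail.takeWhile (fun l => ! PySem.Chars.isIn ('<' :: '/' :: (tyl ++ ['>'])) l)).length
            = tail.length := by
          have h2 := pvDropTakeWhile (fun l => ! PySem.Chars.isIn ('<' :: '/' :: (tyl ++ ['>'])) l) tail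
          rw [hnone, List.drop_eq_nil_iff] at h2
          have h3 : (tail.takeWhile (fun l => ! PySem.Chars.isIn ('<' :: '/' :: (tyl ++ ['>'])) l)).length ≤ tail.length :=
            (List.takeWhile_prefix _).length_le
          omega
        have harith : (tail.length : Int) - 1 + 1 = ((tail.length : Nat) : Int) := by ring
        rw [harith, PySem.List.slice_to_natCast, pvCollect_eq_take, htw, List.take_length]
        exact (List.take_of_length_le (by omega)).symm
      · rw [hce] at hcl
        simp only [hce]
        have hne : ¬ tail.dropWhile (fun l => ! PySem.Chars.isIn ('<' :: '/' :: (tyl ++ ['>'])) l) = [] := by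
          by_contra hab
          rw [if_pos hab] at hcl
          simp at hcl
        rw [if_neg hne, List.head?_cons, Option.some.injEq] at hcl
        subst hcl
        have harith : ((((tail.takeWhile (fun l => ! PySem.Chars.isIn ('<' :: '/' :: (tyl ++ ['>'])) l)).length : Nat) : Int)) + 1
            = (((tail.takeWhile (fun l => ! PySem.Chars.isIn ('<' :: '/' :: (tyl ++ ['>'])) l)).length + 1 : Nat) : Int) := by
          push_cast; ring
        rw [harith, PySem.List.slice_to_natCast, pvCollect_eq_take]
    rw [hblock]
    -- tail is nonempty, hence so is the collected block: the join forms agree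
    rcases htl : tail with _ | ⟨t0, ts⟩
    · exact absurd htl hdw
    · rcases hpc : pvCollect tyl (t0 :: ts) with _ | ⟨b0, bs⟩
      · exact absurd hpc (pvCollect_ne_nil tyl t0 ts)
      · rw [pvJoinNewline]

-- ===== VERDICT (by name: the statement is the Claim_ definition above) =====
theorem get_div_spec : Claim_equal_get_div := by
  intro wc di ty ex _
  unfold Spec_get_div get_div get_div_alt
  by_cases hty : ty = ""
  · simp [hty]
  · simp only [hty, if_false]
    rw [getDivLoopA_false]
    exact pvMain ty.toList di.toList ex.toList (PySem.Chars.splitOn wc.toList ['\n'])
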